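-- pv_equiv track=rewrite | github.com/BOT-SID-KUSH/Content-Automation | grid_gen_bitmaps/ccw_csp.py | generate_grid_clues_tsv
-- ===== SOURCE A (Python) =====
-- def generate_grid_clues_tsv(generated_grids):
--     """Generate a TSV file with clues for the generated grids"""
--     tsv_content = "puzzleId\tword\trow\tcolumn\tdirection\tclueContent\n"
--
--     for filename, grid in generated_grids:
--         puzzle_id = filename.split('.')[0]  # Get puzzle ID from filename
--
--         # Parse the grid to find words
--         words = []
--         height = len(grid)
--         width = len(grid[0]) if height > 0 else 0
--
--         # Find across words
--         for row in range(height):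
--             word = ""
--             start_col = -1
--             for col in range(width):
--                 if grid[row][col] != '.':
--                     if start_col == -1:
--                         start_col = col
--                     word += grid[row][col]
--                 elif word:  # Word ended
--                     if word != '_':  # Skip if word is just underscore
--                         words.append({
--                             'puzzleId': puzzle_id,
--                             'word': word,
--                             'row': row,
--                             'column': start_col - 1,  # Clue position is one before word
--                             'direction': 'across',
--                             'clueContent': 'NA'
--                         })
--                     word = ""
--                     start_col = -1
--                 else:
--                     word = ""
--                     start_col = -1
--             # Check for word at end of row
--             if word and word != '_':
--                 words.append({
--                     'puzzleId': puzzle_id,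
--                     'word': word,
--                     'row': row,
--                     'column': start_col - 1,
--                     'direction': 'across',
--                     'clueContent': 'NA'
--                 })
--
--         # Find down words
--         for col in range(width):
--             word = ""
--             start_row = -1
--             for row in range(height):
--                 if grid[row][col] != '.':
--                     if start_row == -1:
--                         start_row = row
--                     word += grid[row][col]
--                 elif word:  # Word ended
--                     if word != '_':  # Skip if word is just underscore
--                         words.append({
--                             'puzzleId': puzzle_id,
--                             'word': word,
--                             'row': start_row - 1,  # Clue position is one above word
--                             'column': col,
--                             'direction': 'down',
--                             'clueContent': 'NA'
--                         })
--                     word = ""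
--                     start_row = -1
--                 else:
--                     word = ""
--                     start_row = -1
--             # Check for word at end of column
--             if word and word != '_':
--                 words.append({
--                     'puzzleId': puzzle_id,
--                     'word': word,
--                     'row': start_row - 1,
--                     'column': col,
--                     'direction': 'down',
--                     'clueContent': 'NA'
--                 })
--
--         # Add words to TSV content
--         for word_data in words:
--             # Add +1 to row and column for 1-indexing in the final output
--             tsv_content += f"{word_data['puzzleId']}\t{word_data['word']}\t{word_data['row']+1}\t{word_data['column']+1}\t{word_data['direction']}\t{word_data['clueContent']}\n"
--
--     return tsv_content
-- ===== SOURCE B (Python) =====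
-- def _runs(line):
--     """Two-pointer extraction of maximal non-'.' runs as (start, word) pairs."""
--     out = []
--     i, n = 0, len(line)
--     while i < n:
--         if line[i] == '.':
--             i += 1
--         else:
--             j = i
--             while j < n and line[j] != '.':
--                 j += 1
--             out.append((i, line[i:j]))
--             i = j
--     return out
--
--
-- def generate_grid_clues_tsv(generated_grids):
--     rows = ["puzzleId\tword\trow\tcolumn\tdirection\tclueContent"]
--     for filename, grid in generated_grids:
--         puzzle_id = filename.split('.')[0]
--         height = len(grid)
--         width = len(grid[0]) if height > 0 else 0
--         for r in range(height):
--             for s, word in _runs(grid[r][:width]):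
--                 if word != '_':
--                     rows.append(f"{puzzle_id}\t{word}\t{r + 1}\t{s}\tacross\tNA")
--         for c in range(width):
--             col_line = ''.join(grid[r][c] if c < len(grid[r]) else '.' for r in range(height))
--             for s, word in _runs(col_line):
--                 if word != '_':
--                     rows.append(f"{puzzle_id}\t{word}\t{s}\t{c + 1}\tdown\tNA")
--     return "\n".join(rows) + "\n"
-- ===== Notes on version B (the rewrite author's own statement) =====
-- stated objective: idiomatic
-- what changed: A's per-character state machine (word/start_col accumulators with mid-loop resets, a dict list, and repeated string concatenation) is replaced by a two-pointer extraction of maximal non-'.' runs per row/column line, with rows collected in a list and joined once.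
import Mathlib
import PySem

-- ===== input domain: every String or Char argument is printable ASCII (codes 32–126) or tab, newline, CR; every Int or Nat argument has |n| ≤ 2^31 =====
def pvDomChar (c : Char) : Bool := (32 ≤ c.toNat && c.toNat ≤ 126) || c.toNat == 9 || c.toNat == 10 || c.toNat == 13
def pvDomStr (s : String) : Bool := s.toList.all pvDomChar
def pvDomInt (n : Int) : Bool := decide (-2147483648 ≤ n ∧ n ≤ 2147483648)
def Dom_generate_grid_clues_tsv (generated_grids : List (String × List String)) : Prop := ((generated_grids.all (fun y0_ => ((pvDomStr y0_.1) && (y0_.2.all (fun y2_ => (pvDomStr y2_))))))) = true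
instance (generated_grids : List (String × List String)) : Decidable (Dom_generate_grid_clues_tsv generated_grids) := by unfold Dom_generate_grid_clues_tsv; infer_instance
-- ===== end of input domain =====

-- B replaces A's per-character state machine (word/start_col accumulators) by a two-pointer
-- extraction of maximal non-'.' runs per line, collecting TSV rows in a list joined once (idiomatic).

-- ===== PORT A =====
-- entry record: (puzzleId, word, row, column, direction)
abbrev pvEntry := List Char × List Char × Int × Int × List Char

def pvHeader : List Char := "puzzleId\tword\trow\tcolumn\tdirection\tclueContent".toList

-- grid[row][col]; the '.getD' defaults fire only where Python raises IndexError (excluded by Pre_)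
def pvCellA (grid : List String) (r c : Nat) : Char :=
  (PySem.Str.pyGet? (grid.getD r "") (c : Int)).getD '.'

-- the f-string of A (row/column printed with +1)
def pvFmtA (wd : pvEntry) : List Char :=
  wd.1 ++ '\t' :: wd.2.1 ++ '\t' :: PySem.Int.toChars (wd.2.2.1 + 1) ++
    '\t' :: PySem.Int.toChars (wd.2.2.2.1 + 1) ++ '\t' :: wd.2.2.2.2 ++ "\tNA\n".toList

def generate_grid_clues_tsv (generated_grids : List (String × List String)) : String :=
  let tsv := generated_grids.foldl (fun tsv fg =>
    let filename := fg.1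
    let grid := fg.2
    let puzzle_id := (PySem.Chars.splitOn filename.toList ['.']).headD []
    let height := grid.length
    let width := if height > 0 then (grid.headD "").toList.length else 0
    -- across words
    let words : List pvEntry := (List.range height).foldl (fun words r =>
      let st := (List.range width).foldl (fun (st : List Char × Int × List pvEntry) c =>
        if pvCellA grid r c ≠ '.' then
          (st.1 ++ [pvCellA grid r c], if st.2.1 = -1 then (c : Int) else st.2.1, st.2.2)
        else if st.1 ≠ [] then
          ([], -1, if st.1 ≠ ['_'] then st.2.2 ++ [(puzzle_id, st.1, (r : Int), st.2.1 - 1, "across".toList)] else st.2.2)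
        else ([], -1, st.2.2)) ([], -1, words)
      if st.1 ≠ [] ∧ st.1 ≠ ['_'] then st.2.2 ++ [(puzzle_id, st.1, (r : Int), st.2.1 - 1, "across".toList)] else st.2.2) []
    -- down words
    let words : List pvEntry := (List.range width).foldl (fun words c =>
      let st := (List.range height).foldl (fun (st : List Char × Int × List pvEntry) r =>
        if pvCellA grid r c ≠ '.' then
          (st.1 ++ [pvCellA grid r c], if st.2.1 = -1 then (r : Int) else st.2.1, st.2.2)
        else if st.1 ≠ [] then
          ([], -1, if st.1 ≠ ['_'] then st.2.2 ++ [(puzzle_id, st.1, st.2.1 - 1, (c : Int), "down".toList)] else st.2.2)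
        else ([], -1, st.2.2)) ([], -1, words)
      if st.1 ≠ [] ∧ st.1 ≠ ['_'] then st.2.2 ++ [(puzzle_id, st.1, st.2.1 - 1, (c : Int), "down".toList)] else st.2.2) words
    words.foldl (fun t wd => t ++ pvFmtA wd) tsv) (pvHeader ++ ['\n'])
  String.ofList tsv

-- ===== PORT B =====
-- inner while of _runs: split off the leading maximal non-'.' run
def pvSpanRun : List Char → List Char × List Char
  | [] => ([], [])
  | c :: rest => if c = '.' then ([], c :: rest) else
      let p := pvSpanRun rest
      (c :: p.1, p.2)

-- _runs: two-pointer scan producing (start, word) pairs; the fuel argument only makes the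
-- recursion structural (each step consumes at least one character, so l.length fuel is enough)
def pvRunsF : Nat → List Char → Nat → List (Nat × List Char)
  | 0, _, _ => []
  | _ + 1, [], _ => []
  | fuel + 1, c :: rest, i =>
    if c = '.' then pvRunsF fuel rest (i + 1)
    else
      let p := pvSpanRun rest
      (i, c :: p.1) :: pvRunsF fuel p.2 (i + 1 + p.1.length)

def pvRuns (l : List Char) (i : Nat) : List (Nat × List Char) := pvRunsF l.length l i

-- the f-string of B (no trailing newline; rows are joined at the end)
def pvFmtB (pid word : List Char) (a b : Int) (dir : List Char) : List Char :=
  pid ++ '\t' :: word ++ '\t' :: PySem.Int.toChars a ++ '\t' :: PySem.Int.toChars b ++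
    '\t' :: dir ++ "\tNA".toList

def generate_grid_clues_tsv_alt (generated_grids : List (String × List String)) : String :=
  let rows := generated_grids.foldl (fun rows fg =>
    let filename := fg.1
    let grid := fg.2
    let puzzle_id := (PySem.Chars.splitOn filename.toList ['.']).headD []
    let height := grid.length
    let width := if height > 0 then (grid.headD "").toList.length else 0
    let rows := rows ++ (List.range height).flatMap (fun (r : Nat) =>
      ((pvRuns ((grid.getD r "").toList.take width) 0).filter (fun p => p.2 ≠ ['_'])).map
        (fun p => pvFmtB puzzle_id p.2 ((r : Int) + 1) (p.1 : Int) "across".toList))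
    rows ++ (List.range width).flatMap (fun (c : Nat) =>
      let colLine := (List.range height).map (fun r => (grid.getD r "").toList.getD c '.')
      ((pvRuns colLine 0).filter (fun p => p.2 ≠ ['_'])).map
        (fun p => pvFmtB puzzle_id p.2 (p.1 : Int) ((c : Int) + 1) "down".toList)))
    [pvHeader]
  String.ofList (PySem.Chars.join ['\n'] rows ++ ['\n'])

-- ===== PRECONDITION & SPEC =====
-- Pre_ excludes exactly the ragged grids on which A raises IndexError: some row shorter than
-- the first row (whose length A takes as the width).
def Pre_generate_grid_clues_tsv (generated_grids : List (String × List String)) : Prop :=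
  ∀ p ∈ generated_grids, ∀ row ∈ p.2, (p.2.headD "").toList.length ≤ row.toList.length
instance (generated_grids : List (String × List String)) : Decidable (Pre_generate_grid_clues_tsv generated_grids) := by unfold Pre_generate_grid_clues_tsv; infer_instance

def pvWitness_generate_grid_clues_tsv : (List (String × List String)) := [("p1.txt", ["AB.", "_.C"])]

def Spec_generate_grid_clues_tsv (generated_grids : List (String × List String)) (out : String) : Prop := out = generate_grid_clues_tsv_alt generated_grids
instance (generated_grids : List (String × List String)) (out : String) : Decidable (Spec_generate_grid_clues_tsv generated_grids out) := by unfold Spec_generate_grid_clues_tsv; infer_instance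

-- ===== CLAIM (what is proved, stated in full; the proofs are below) =====
def Claim_equal_generate_grid_clues_tsv : Prop := ∀ (generated_grids : List (String × List String)), Dom_generate_grid_clues_tsv generated_grids → Pre_generate_grid_clues_tsv generated_grids → Spec_generate_grid_clues_tsv generated_grids (generate_grid_clues_tsv generated_grids)

-- ===== LEMMAS AND PROOFS =====

theorem pvSpanRun_snd_le (l : List Char) : (pvSpanRun l).2.length ≤ l.length := by
  induction l with
  | nil => simp [pvSpanRun]
  | cons c rest ih =>
    by_cases h : c = '.'
    · simp [pvSpanRun, h]
    · simp only [pvSpanRun, if_neg h, List.length_cons]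
      exact Nat.le_succ_of_le ih

-- A's inner-loop state machine over an abstract cell reader, and its end-of-line check
def pvStep (e : Int → List Char → pvEntry) (cell : Nat → Char)
    (st : List Char × Int × List pvEntry) (c : Nat) : List Char × Int × List pvEntry :=
  if cell c ≠ '.' then (st.1 ++ [cell c], if st.2.1 = -1 then (c : Int) else st.2.1, st.2.2)
  else if st.1 ≠ [] then ([], -1, if st.1 ≠ ['_'] then st.2.2 ++ [e st.2.1 st.1] else st.2.2)
  else ([], -1, st.2.2)

def pvMach (e : Int → List Char → pvEntry) :
    List Char → Nat → (List Char × Int × List pvEntry) → List Char × Int × List pvEntry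
  | [], _, st => st
  | ch :: rest, i, st =>
    if ch ≠ '.' then pvMach e rest (i + 1) (st.1 ++ [ch], if st.2.1 = -1 then (i : Int) else st.2.1, st.2.2)
    else if st.1 ≠ [] then pvMach e rest (i + 1) ([], -1, if st.1 ≠ ['_'] then st.2.2 ++ [e st.2.1 st.1] else st.2.2)
    else pvMach e rest (i + 1) ([], -1, st.2.2)

def pvFin (e : Int → List Char → pvEntry) (st : List Char × Int × List pvEntry) : List pvEntry :=
  if st.1 ≠ [] ∧ st.1 ≠ ['_'] then st.2.2 ++ [e st.2.1 st.1] else st.2.2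

-- A's fold over column indices is the machine run over the list of cells it reads
theorem pvFold_eq_mach (e : Int → List Char → pvEntry) (cell : Nat → Char) :
    ∀ (n i : Nat) (st : List Char × Int × List pvEntry),
      (List.range' i n).foldl (pvStep e cell) st = pvMach e ((List.range' i n).map cell) i st := by
  intro n
  induction n with
  | zero => intro i st; simp [pvMach]
  | succ n ih =>
    intro i st
    rw [List.range'_succ]
    simp only [List.foldl_cons, List.map_cons, pvMach]
    rw [ih]
    simp only [pvStep]
    split_ifs <;> rfl

theorem pvSpanRun_dot (rest : List Char) : pvSpanRun ('.' :: rest) = ([], '.' :: rest) := by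
  simp [pvSpanRun]

theorem pvSpanRun_cons (c : Char) (rest : List Char) (h : c ≠ '.') :
    pvSpanRun (c :: rest) = (c :: (pvSpanRun rest).1, (pvSpanRun rest).2) := by
  simp [pvSpanRun, h]

-- fuel irrelevance for pvRunsF, and the resulting unfolding equations of pvRuns
theorem pvRunsF_irrel : ∀ (f₁ f₂ : Nat) (l : List Char) (i : Nat),
    l.length ≤ f₁ → l.length ≤ f₂ → pvRunsF f₁ l i = pvRunsF f₂ l i := by
  intro f₁
  induction f₁ with
  | zero =>
    intro f₂ l i h1 _
    have : l = [] := List.length_eq_zero_iff.mp (Nat.le_zero.mp h1)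
    subst this
    cases f₂ <;> rfl
  | succ f ih =>
    intro f₂ l i h1 h2
    cases l with
    | nil => cases f₂ <;> rfl
    | cons c rest =>
      cases f₂ with
      | zero => simp at h2
      | succ f' =>
        simp only [pvRunsF]
        by_cases h : c = '.'
        · simp only [if_pos h]
          exact ih f' rest (i + 1) (by simpa using h1) (by simpa using h2)
        · simp only [if_neg h]
          have hs := pvSpanRun_snd_le rest
          simp only [List.length_cons] at h1 h2
          rw [ih f' (pvSpanRun rest).2 _ (by omega) (by omega)]

theorem pvRuns_nil (i : Nat) : pvRuns [] i = [] := rfl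

theorem pvRuns_dot (rest : List Char) (i : Nat) : pvRuns ('.' :: rest) i = pvRuns rest (i + 1) := by
  simp only [pvRuns, List.length_cons, pvRunsF]
  simp

theorem pvRuns_run (c : Char) (rest : List Char) (i : Nat) (h : c ≠ '.') :
    pvRuns (c :: rest) i =
      (i, c :: (pvSpanRun rest).1) :: pvRuns (pvSpanRun rest).2 (i + 1 + (pvSpanRun rest).1.length) := by
  simp only [pvRuns, List.length_cons, pvRunsF, if_neg h]
  have hs := pvSpanRun_snd_le rest
  exact congrArg _ (pvRunsF_irrel _ _ _ _ (by omega) le_rfl)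

-- machine = runs: joint induction (clean state / inside a run) on the length of the line
theorem pvMachRuns (e : Int → List Char → pvEntry) :
    ∀ (N : Nat) (l : List Char), l.length ≤ N →
      (∀ (i : Nat) (acc : List pvEntry),
        pvFin e (pvMach e l i ([], -1, acc)) =
          acc ++ ((pvRuns l i).filter (fun p => p.2 ≠ ['_'])).map (fun p => e (p.1 : Int) p.2)) ∧
      (∀ (i s : Nat) (w : List Char) (acc : List pvEntry), w ≠ [] →
        pvFin e (pvMach e l i (w, (s : Int), acc)) =
          acc ++ (if w ++ (pvSpanRun l).1 ≠ ['_'] then [e (s : Int) (w ++ (pvSpanRun l).1)] else []) ++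
            ((pvRuns (pvSpanRun l).2 (i + (pvSpanRun l).1.length)).filter (fun p => p.2 ≠ ['_'])).map
              (fun p => e (p.1 : Int) p.2)) := by
  intro N
  induction N with
  | zero =>
    intro l hl
    have : l = [] := List.length_eq_zero_iff.mp (Nat.le_zero.mp hl)
    subst this
    constructor
    · intro i acc; simp [pvMach, pvFin, pvRuns_nil]
    · intro i s w acc hw
      simp only [pvMach, pvFin, pvSpanRun, pvRuns_nil, List.append_nil, List.filter_nil,
        List.map_nil]
      by_cases h : w = ['_'] <;> simp [h, hw]
  | succ N ih =>
    intro l hl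
    cases l with
    | nil =>
      constructor
      · intro i acc; simp [pvMach, pvFin, pvRuns_nil]
      · intro i s w acc hw
        simp only [pvMach, pvFin, pvSpanRun, pvRuns_nil, List.append_nil, List.filter_nil,
          List.map_nil]
        by_cases h : w = ['_'] <;> simp [h, hw]
    | cons ch rest =>
      have hr : rest.length ≤ N := by simpa using hl
      obtain ⟨ihP, ihQ⟩ := ih rest hr
      constructor
      · intro i acc
        by_cases h : ch = '.'
        · subst h
          have hstep : pvMach e ('.' :: rest) i ([], -1, acc) = pvMach e rest (i + 1) ([], -1, acc) := by
            simp [pvMach]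
          rw [hstep, ihP (i + 1) acc, pvRuns_dot]
        · have hstep : pvMach e (ch :: rest) i ([], -1, acc) =
              pvMach e rest (i + 1) ([ch], (i : Int), acc) := by
            simp [pvMach, h]
          rw [hstep, ihQ (i + 1) i [ch] acc (by simp), pvRuns_run ch rest i h]
          simp only [List.filter_cons, List.singleton_append]
          by_cases h2 : ch :: (pvSpanRun rest).1 = ['_'] <;>
            simp [h2, List.append_assoc, Nat.add_assoc, Nat.add_comm 1]
      · intro i s w acc hw
        by_cases h : ch = '.'
        · subst h
          have hstep : pvMach e ('.' :: rest) i (w, (s : Int), acc) =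
              pvMach e rest (i + 1) ([], -1, if w ≠ ['_'] then acc ++ [e (s : Int) w] else acc) := by
            simp [pvMach, hw]
          rw [hstep, ihP (i + 1), pvSpanRun_dot]
          simp only [List.length_nil, Nat.add_zero, List.append_nil]
          rw [pvRuns_dot]
          by_cases h2 : w = ['_'] <;> simp [h2, List.append_assoc]
        · have hstep : pvMach e (ch :: rest) i (w, (s : Int), acc) =
              pvMach e rest (i + 1) (w ++ [ch], (s : Int), acc) := by
            simp [pvMach, h, show ¬((s : Int) = -1) from by omega]
          rw [hstep, ihQ (i + 1) s (w ++ [ch]) acc (by simp), pvSpanRun_cons ch rest h]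
          simp only [List.append_assoc, List.singleton_append, List.length_cons]
          rw [show i + 1 + (pvSpanRun rest).1.length = i + ((pvSpanRun rest).1.length + 1) from by omega]

-- reading grid[r][c] through pyGet? is List.getD with default '.'
theorem pvCellA_eq_getD (grid : List String) (r c : Nat) :
    pvCellA grid r c = (grid.getD r "").toList.getD c '.' := by
  simp [pvCellA, List.getD_eq_getElem?_getD]

-- the cells A's across loop reads are the row restricted to the width (needs the row long enough)
theorem pvCells_across (grid : List String) (r width : Nat)
    (hw : width ≤ (grid.getD r "").toList.length) :
    (List.range' 0 width).map (fun c => pvCellA grid r c) = (grid.getD r "").toList.take width := by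
  rw [← List.range_eq_range']
  apply List.ext_getElem
  · simp only [List.length_map, List.length_range, List.length_take]
    omega
  · intro n h1 h2
    simp only [List.getElem_map, List.getElem_range, List.getElem_take, pvCellA_eq_getD]
    have hn : n < (grid.getD r "").toList.length := by
      simp only [List.length_map, List.length_range] at h1
      omega
    rw [List.getD_eq_getElem?_getD, List.getElem?_eq_getElem hn, Option.getD_some]

-- the cells A's down loop reads are exactly B's padded column line
theorem pvCells_down (grid : List String) (c height : Nat) :
    (List.range' 0 height).map (fun r => pvCellA grid r c) =
      (List.range height).map (fun r => (grid.getD r "").toList.getD c '.') := by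
  rw [← List.range_eq_range']
  exact List.map_congr_left (fun r _ => pvCellA_eq_getD grid r c)

-- A's across-row loop, in terms of B's runs of the row
theorem pvRowA (pid : List Char) (grid : List String) (r width : Nat) (words : List pvEntry)
    (hw : width ≤ (grid.getD r "").toList.length) :
    pvFin (fun s w => (pid, w, (r : Int), s - 1, "across".toList))
      ((List.range width).foldl
        (pvStep (fun s w => (pid, w, (r : Int), s - 1, "across".toList)) (fun c => pvCellA grid r c))
        ([], -1, words)) =
    words ++ ((pvRuns ((grid.getD r "").toList.take width) 0).filter (fun p => p.2 ≠ ['_'])).map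
      (fun p => (pid, p.2, (r : Int), (p.1 : Int) - 1, "across".toList)) := by
  conv_lhs => rw [List.range_eq_range']
  rw [pvFold_eq_mach, pvCells_across grid r width hw]
  exact ((pvMachRuns _ _ _ le_rfl).1 0 words)

-- A's down-column loop, in terms of B's runs of the column line
theorem pvColA (pid : List Char) (grid : List String) (c height : Nat) (words : List pvEntry) :
    pvFin (fun s w => (pid, w, s - 1, (c : Int), "down".toList))
      ((List.range height).foldl
        (pvStep (fun s w => (pid, w, s - 1, (c : Int), "down".toList)) (fun r => pvCellA grid r c))
        ([], -1, words)) =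
    words ++ ((pvRuns ((List.range height).map (fun r => (grid.getD r "").toList.getD c '.')) 0).filter
        (fun p => p.2 ≠ ['_'])).map (fun p => (pid, p.2, (p.1 : Int) - 1, (c : Int), "down".toList)) := by
  conv_lhs => rw [List.range_eq_range']
  rw [pvFold_eq_mach, pvCells_down grid c height]
  exact ((pvMachRuns _ _ _ le_rfl).1 0 words)

-- formatted A-entry of an across run = B's row followed by the newline B's join re-inserts
theorem pvFmt_across (pid w : List Char) (r : Int) (s : Nat) :
    pvFmtA (pid, w, r, (s : Int) - 1, "across".toList) =
      pvFmtB pid w (r + 1) (s : Int) "across".toList ++ ['\n'] := by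
  have h : ("\tNA\n".toList : List Char) = "\tNA".toList ++ ['\n'] := by decide
  simp [pvFmtA, pvFmtB, h]

theorem pvFmt_down (pid w : List Char) (c : Int) (s : Nat) :
    pvFmtA (pid, w, (s : Int) - 1, c, "down".toList) =
      pvFmtB pid w (s : Int) (c + 1) "down".toList ++ ['\n'] := by
  have h : ("\tNA\n".toList : List Char) = "\tNA".toList ++ ['\n'] := by decide
  simp [pvFmtA, pvFmtB, h]

-- B's per-grid rows (exactly the two flatMaps of B's loop body)
def pvGridLines (fg : String × List String) : List (List Char) :=
  let grid := fg.2
  let puzzle_id := (PySem.Chars.splitOn fg.1.toList ['.']).headD []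
  let height := grid.length
  let width := if height > 0 then (grid.headD "").toList.length else 0
  (List.range height).flatMap (fun (r : Nat) =>
    ((pvRuns ((grid.getD r "").toList.take width) 0).filter (fun p => p.2 ≠ ['_'])).map
      (fun p => pvFmtB puzzle_id p.2 ((r : Int) + 1) (p.1 : Int) "across".toList)) ++
  (List.range width).flatMap (fun (c : Nat) =>
    ((pvRuns ((List.range height).map (fun r => (grid.getD r "").toList.getD c '.')) 0).filter
        (fun p => p.2 ≠ ['_'])).map
      (fun p => pvFmtB puzzle_id p.2 (p.1 : Int) ((c : Int) + 1) "down".toList))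

-- "\n".join(rows) + "\n"  =  every row followed by '\n'
theorem pvJoinNl (ls : List (List Char)) (h : List Char) :
    PySem.Chars.join ['\n'] (h :: ls) ++ ['\n'] =
      (h ++ ['\n']) ++ ls.flatMap (fun l => l ++ ['\n']) := by
  induction ls generalizing h with
  | nil => simp [PySem.Chars.join_singleton]
  | cons x xs ih =>
    rw [PySem.Chars.join_cons_cons, List.flatMap_cons]
    simp only [List.append_assoc, ih x]

-- congr-then-flatten for a fold that appends a block per element
theorem pvFoldFlat {α β : Type} (l : List α) (f : List β → α → List β) (g : α → List β)
    (init : List β) (h : ∀ (acc : List β), ∀ x ∈ l, f acc x = acc ++ g x) :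
    l.foldl f init = init ++ l.flatMap g :=
  (PySem.List.foldl_congr_mem l f _ init h).trans (PySem.List.foldl_append_eq_flatMap g l init)

-- proof-side names for the pieces of A's per-grid body
def pvW (grid : List String) : Nat := if grid.length > 0 then (grid.headD "").toList.length else 0

def pvPid (fg : String × List String) : List Char := (PySem.Chars.splitOn fg.1.toList ['.']).headD []

def pvEA (pid : List Char) (r : Nat) : Int → List Char → pvEntry :=
  fun s w => (pid, w, (r : Int), s - 1, "across".toList)

def pvED (pid : List Char) (c : Nat) : Int → List Char → pvEntry :=
  fun s w => (pid, w, s - 1, (c : Int), "down".toList)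

def pvWordsA (fg : String × List String) : List pvEntry :=
  (List.range (pvW fg.2)).foldl
    (fun words c => pvFin (pvED (pvPid fg) c)
      ((List.range fg.2.length).foldl
        (pvStep (pvED (pvPid fg) c) (fun r => pvCellA fg.2 r c)) ([], -1, words)))
    ((List.range fg.2.length).foldl
      (fun words r => pvFin (pvEA (pvPid fg) r)
        ((List.range (pvW fg.2)).foldl
          (pvStep (pvEA (pvPid fg) r) (fun c => pvCellA fg.2 r c)) ([], -1, words))) [])

-- A's whole per-grid body, against B's rows of that grid
theorem pvGridA (tsv : List Char) (fg : String × List String)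
    (hpref : ∀ row ∈ fg.2, (fg.2.headD "").toList.length ≤ row.toList.length) :
    (pvWordsA fg).foldl (fun t wd => t ++ pvFmtA wd) tsv =
      tsv ++ (pvGridLines fg).flatMap (fun l => l ++ ['\n']) := by
  unfold pvWordsA
  rw [pvFoldFlat (List.range fg.2.length) _
      (fun r => ((pvRuns ((fg.2.getD r "").toList.take (pvW fg.2)) 0).filter
          (fun p => p.2 ≠ ['_'])).map
        (fun p => (pvPid fg, p.2, (r : Int), (p.1 : Int) - 1, "across".toList))) [] ?hrow]
  rw [pvFoldFlat (List.range (pvW fg.2)) _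
      (fun c => ((pvRuns ((List.range fg.2.length).map
            (fun r => (fg.2.getD r "").toList.getD c '.')) 0).filter
          (fun p => p.2 ≠ ['_'])).map
        (fun p => (pvPid fg, p.2, (p.1 : Int) - 1, (c : Int), "down".toList))) _ ?hcol]
  case hrow =>
    intro words r hr
    have hh : fg.2.length > 0 := by have := List.mem_range.mp hr; omega
    have hrl : r < fg.2.length := List.mem_range.mp hr
    have hmem : fg.2.getD r "" ∈ fg.2 := by
      rw [List.getD_eq_getElem?_getD, List.getElem?_eq_getElem hrl, Option.getD_some]
      exact List.getElem_mem _
    have hw : pvW fg.2 ≤ (fg.2.getD r "").toList.length := by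
      unfold pvW
      rw [if_pos hh]
      exact hpref _ hmem
    exact pvRowA (pvPid fg) fg.2 r (pvW fg.2) words hw
  case hcol =>
    intro words c _
    exact pvColA (pvPid fg) fg.2 c fg.2.length words
  rw [PySem.List.foldl_append_eq_flatMap pvFmtA _ tsv]
  congr 1
  simp only [pvGridLines, List.nil_append, List.flatMap_append, List.flatMap_assoc,
    List.flatMap_map]
  congr 1
  · simp only [pvW, pvPid]
    congr 1
    funext x
    congr 1
    funext a
    exact pvFmt_across _ _ _ _
  · simp only [pvW, pvPid]
    congr 1
    funext x
    congr 1
    funext a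
    exact pvFmt_down _ _ _ _

-- ===== VERDICT (by name: the statement is the Claim_ definition above) =====
theorem generate_grid_clues_tsv_spec : Claim_equal_generate_grid_clues_tsv := by
  intro gg _ hpre
  unfold Spec_generate_grid_clues_tsv
  unfold generate_grid_clues_tsv generate_grid_clues_tsv_alt
  apply congrArg String.ofList
  rw [pvFoldFlat gg _ (fun fg => (pvGridLines fg).flatMap (fun l => l ++ ['\n']))
      (pvHeader ++ ['\n']) ?hA]
  case hA =>
    intro tsv fg hfg
    exact pvGridA tsv fg (fun row hrow => hpre fg hfg row hrow)
  rw [pvFoldFlat gg _ pvGridLines [pvHeader] ?hB]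
  case hB =>
    intro rows fg hfg
    exact List.append_assoc rows _ _
  rw [List.singleton_append, pvJoinNl, List.flatMap_assoc]
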